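-- pv_equiv track=rewrite | github.com/argamanza/Wiki7 | data/data_pipeline/auto_translate_hebrew.py | _transliterate_to_hebrew
-- ===== SOURCE A (Python) =====
-- _LATIN_TO_HEBREW = {
--     "a": "א", "b": "ב", "c": "ק", "d": "ד", "e": "א", "f": "פ",
--     "g": "ג", "h": "ה", "i": "י", "j": "ג'", "k": "ק", "l": "ל",
--     "m": "מ", "n": "נ", "o": "ו", "p": "פ", "q": "ק", "r": "ר",
--     "s": "ס", "t": "ט", "u": "ו", "v": "ו", "w": "ו", "x": "קס",
--     "y": "י", "z": "ז",
-- }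
--
-- _DIGRAPHS = {
--     "sh": "ש", "ch": "צ'", "th": "ת", "tz": "צ", "zh": "ז'",
--     "ph": "פ", "kh": "ח",
-- }
--
-- def _transliterate_to_hebrew(text: str) -> str:
--     """Phonetic transliteration from Latin script to Hebrew characters.
--     Used as fallback when Google Translate returns the input unchanged.
--     """
--     parts = []
--     for word in text.split():
--         hebrew_word = []
--         i = 0
--         lower = word.lower()
--         while i < len(lower):
--             if i + 1 < len(lower) and lower[i:i+2] in _DIGRAPHS:
--                 hebrew_word.append(_DIGRAPHS[lower[i:i+2]])
--                 i += 2
--             elif lower[i] in _LATIN_TO_HEBREW: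
--                 hebrew_word.append(_LATIN_TO_HEBREW[lower[i]])
--                 i += 1
--             else:
--                 hebrew_word.append(word[i])
--                 i += 1
--         parts.append("".join(hebrew_word))
--     return " ".join(parts)
-- ===== SOURCE B (Python) =====
-- _LATIN_TO_HEBREW = {
--     "a": "א", "b": "ב", "c": "ק", "d": "ד", "e": "א", "f": "פ",
--     "g": "ג", "h": "ה", "i": "י", "j": "ג'", "k": "ק", "l": "ל",
--     "m": "מ", "n": "נ", "o": "ו", "p": "פ", "q": "ק", "r": "ר",
--     "s": "ס", "t": "ט", "u": "ו", "v": "ו", "w": "ו", "x": "קס",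
--     "y": "י", "z": "ז",
-- }
--
-- _DIGRAPHS = {
--     "sh": "ש", "ch": "צ'", "th": "ת", "tz": "צ", "zh": "ז'",
--     "ph": "פ", "kh": "ח",
-- }
--
--
-- def _transliterate_to_hebrew(text: str) -> str:
--     """One-pass transliteration: a small state machine over the raw text that
--     handles word separation inline instead of split()-ing first."""
--     out = []
--     first = True     # no word emitted yet
--     in_word = False  # currently inside a word
--     i = 0
--     n = len(text)
--     while i < n:
--         c = text[i]
--         if c.isspace():
--             in_word = False
--             i += 1
--             continue
--         if not in_word and not first:
--             out.append(" ")
--         lo = c.lower()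
--         pair = lo + (text[i + 1].lower() if i + 1 < n else "")
--         if pair in _DIGRAPHS:
--             out.append(_DIGRAPHS[pair])
--             i += 2
--         elif lo in _LATIN_TO_HEBREW:
--             out.append(_LATIN_TO_HEBREW[lo])
--             i += 1
--         else:
--             out.append(c)
--             i += 1
--         first = False
--         in_word = True
--     return "".join(out)
-- ===== Notes on version B (the rewrite author's own statement) =====
-- stated objective: alternative
-- what changed: Replaces split()-then-per-word-index-while-loop (with a separate lowered copy and a parts list joined at the end) by a single left-to-right state-machine pass over the raw text that lowercases per character and handles word boundaries and separator spaces inline.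
import Mathlib
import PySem

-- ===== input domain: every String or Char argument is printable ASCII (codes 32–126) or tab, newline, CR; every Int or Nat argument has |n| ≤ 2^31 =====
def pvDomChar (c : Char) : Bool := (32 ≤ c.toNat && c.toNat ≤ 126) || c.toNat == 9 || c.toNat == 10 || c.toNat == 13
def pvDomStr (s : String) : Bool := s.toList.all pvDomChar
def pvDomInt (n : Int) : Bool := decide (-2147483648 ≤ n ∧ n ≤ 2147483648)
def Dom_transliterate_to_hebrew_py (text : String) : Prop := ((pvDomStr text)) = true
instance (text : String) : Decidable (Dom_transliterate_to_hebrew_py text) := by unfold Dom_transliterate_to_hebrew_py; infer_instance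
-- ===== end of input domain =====

-- B replaces split()-then-per-word-index-loop by a single state-machine pass over the raw
-- text that handles word separation inline (objective: alternative, same cost).


-- shared module constants _LATIN_TO_HEBREW / _DIGRAPHS, as lookup functions (values as char lists)
def pvLatin (c : Char) : Option (List Char) :=
  match c with
  | 'a' => some ['א'] | 'b' => some ['ב'] | 'c' => some ['ק'] | 'd' => some ['ד']
  | 'e' => some ['א'] | 'f' => some ['פ'] | 'g' => some ['ג'] | 'h' => some ['ה']
  | 'i' => some ['י'] | 'j' => some ['ג', '\''] | 'k' => some ['ק'] | 'l' => some ['ל']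
  | 'm' => some ['מ'] | 'n' => some ['נ'] | 'o' => some ['ו'] | 'p' => some ['פ']
  | 'q' => some ['ק'] | 'r' => some ['ר'] | 's' => some ['ס'] | 't' => some ['ט']
  | 'u' => some ['ו'] | 'v' => some ['ו'] | 'w' => some ['ו'] | 'x' => some ['ק', 'ס']
  | 'y' => some ['י'] | 'z' => some ['ז'] | _ => none

def pvDigraph (a b : Char) : Option (List Char) :=
  if b = 'h' then
    if a = 's' then some ['ש'] else if a = 'c' then some ['צ', '\'']
    else if a = 't' then some ['ת'] else if a = 'z' then some ['ז', '\'']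
    else if a = 'p' then some ['פ'] else if a = 'k' then some ['ח'] else none
  else if b = 'z' then
    if a = 't' then some ['צ'] else none
  else none

-- ===== PORT A =====
-- A's while-loop over (lower, word) in index lockstep, as structural recursion on both lists
def pvALoop : List Char → List Char → List (List Char)
  | l1 :: l2 :: lr, w1 :: w2 :: wr =>
    (match pvDigraph l1 l2 with
     | some h => h :: pvALoop lr wr
     | none =>
       match pvLatin l1 with
       | some h => h :: pvALoop (l2 :: lr) (w2 :: wr)
       | none => [w1] :: pvALoop (l2 :: lr) (w2 :: wr))
  | [l1], w1 :: _ =>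
    [match pvLatin l1 with | some h => h | none => [w1]]
  | _, _ => []

def transliterate_to_hebrew_py (text : String) : String :=
  PySem.Str.join " " ((PySem.Str.split₀ text).map (fun word =>
    String.ofList (PySem.Chars.join [] (pvALoop (PySem.Chars.lower word.toList) word.toList))))

-- ===== PORT B =====
-- one non-space char when no digraph applies
def pvStep1 (c : Char) : List Char :=
  match pvLatin (PySem.Chars.lowerChar c) with
  | some h => h
  | none => [c]

-- B's single while-loop as recursion on the remaining chars; state = (first, in_word)
def pvBGo : List Char → Bool → Bool → List Char
  | [], _, _ => []
  | c :: rest, first, inw =>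
    if PySem.Chars.isspace c then pvBGo rest first false
    else
      let pre : List Char := if inw || first then [] else [' ']
      match rest with
      | c2 :: rest2 =>
        (match pvDigraph (PySem.Chars.lowerChar c) (PySem.Chars.lowerChar c2) with
         | some h => pre ++ h ++ pvBGo rest2 false true
         | none => pre ++ pvStep1 c ++ pvBGo (c2 :: rest2) false true)
      | [] => pre ++ pvStep1 c

def transliterate_to_hebrew_py_alt (text : String) : String :=
  String.ofList (pvBGo text.toList true false)

-- ===== PRECONDITION & SPEC =====
def Spec_transliterate_to_hebrew_py (text : String) (out : String) : Prop := out = transliterate_to_hebrew_py_alt text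
instance (text : String) (out : String) : Decidable (Spec_transliterate_to_hebrew_py text out) := by unfold Spec_transliterate_to_hebrew_py; infer_instance

-- ===== CLAIM (what is proved, stated in full; the proofs are below) =====
def Claim_equal_transliterate_to_hebrew_py : Prop := ∀ (text : String), Dom_transliterate_to_hebrew_py text → Spec_transliterate_to_hebrew_py text (transliterate_to_hebrew_py text)

-- ===== LEMMAS AND PROOFS =====

-- A's per-word output
def pvFW (w : List Char) : List Char :=
  PySem.Chars.join [] (pvALoop (PySem.Chars.lower w) w)

-- textbook characterisation of str.split()
def pvMySplit : List Char → List (List Char)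
  | [] => []
  | c :: cs =>
    if PySem.Chars.isspace c then pvMySplit cs
    else (c :: cs.takeWhile (fun x => !PySem.Chars.isspace x)) ::
         pvMySplit (cs.dropWhile (fun x => !PySem.Chars.isspace x))
termination_by cs => cs.length
decreasing_by
  · simp
  · exact Nat.lt_succ_of_le (List.length_dropWhile_le _ _)

-- step equations for pvBGo
theorem pvBGo_sp {c : Char} (rest : List Char) (f inw : Bool)
    (h : PySem.Chars.isspace c = true) :
    pvBGo (c :: rest) f inw = pvBGo rest f false := by
  rw [pvBGo.eq_2]; simp [h]

theorem pvBGo_one {c : Char} (f inw : Bool) (h : PySem.Chars.isspace c = false) :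
    pvBGo [c] f inw = (if inw || f then [] else [' ']) ++ pvStep1 c := by
  rw [pvBGo.eq_2]; simp [h, Bool.or_comm]

theorem pvBGo_dig {c c2 : Char} (r : List Char) (f inw : Bool) {h : List Char}
    (hc : PySem.Chars.isspace c = false)
    (hd : pvDigraph (PySem.Chars.lowerChar c) (PySem.Chars.lowerChar c2) = some h) :
    pvBGo (c :: c2 :: r) f inw =
      (if inw || f then [] else [' ']) ++ h ++ pvBGo r false true := by
  rw [pvBGo.eq_2]; simp [hc, hd, Bool.or_comm]

theorem pvBGo_nodig {c c2 : Char} (r : List Char) (f inw : Bool)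
    (hc : PySem.Chars.isspace c = false)
    (hd : pvDigraph (PySem.Chars.lowerChar c) (PySem.Chars.lowerChar c2) = none) :
    pvBGo (c :: c2 :: r) f inw =
      (if inw || f then [] else [' ']) ++ pvStep1 c ++ pvBGo (c2 :: r) false true := by
  rw [pvBGo.eq_2]; simp [hc, hd, Bool.or_comm]

theorem pvGo_acc (cs : List Char) : ∀ cur acc,
    PySem.Chars.split₀.go cs cur acc = acc.reverse ++ PySem.Chars.split₀.go cs cur [] := by
  induction cs with
  | nil => intro cur acc; simp [PySem.Chars.split₀.go]; split <;> simp
  | cons c rest ih =>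
    intro cur acc
    simp only [PySem.Chars.split₀.go]
    split
    · split
      · exact ih _ _
      · rw [ih _ (_ :: acc), ih _ [_]]
        try simp
    · exact ih _ _

theorem pvGo_eq_mySplit (cs : List Char) : ∀ cur, (∀ x ∈ cur, PySem.Chars.isspace x = false) →
    PySem.Chars.split₀.go cs cur [] = pvMySplit (cur.reverse ++ cs) := by
  induction cs with
  | nil =>
    intro cur hcur
    simp only [PySem.Chars.split₀.go]
    split
    · simp_all [pvMySplit]
    · rename_i h
      have : cur ≠ [] := by simpa [List.isEmpty_iff] using h
      obtain ⟨c0, cr, hrev⟩ := List.exists_cons_of_ne_nil (List.reverse_ne_nil_iff.mpr this)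
      have hall : ∀ x ∈ cur.reverse, PySem.Chars.isspace x = false := by
        intro x hx; exact hcur x (List.mem_reverse.mp hx)
      rw [hrev] at hall ⊢
      simp only [List.append_nil, pvMySplit, hall c0 (by simp)]
      rw [List.takeWhile_eq_self_iff.mpr, List.dropWhile_eq_nil_iff.mpr]
      · simp [pvMySplit]
      · intro x hx; simp [hall x (by simp [hx])]
      · intro x hx; simp [hall x (by simp [hx])]
  | cons c rest ih =>
    intro cur hcur
    simp only [PySem.Chars.split₀.go]
    split
    · rename_i hsp
      split
      · rename_i h
        have : cur = [] := by simpa [List.isEmpty_iff] using h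
        subst this
        simp only [List.reverse_nil, List.nil_append, pvMySplit, hsp, if_pos]
        exact ih [] (by simp)
      · rename_i h
        have hne : cur ≠ [] := by simpa [List.isEmpty_iff] using h
        rw [pvGo_acc, ih [] (by simp)]
        obtain ⟨c0, cr, hrev⟩ := List.exists_cons_of_ne_nil (List.reverse_ne_nil_iff.mpr hne)
        have hall : ∀ x ∈ cur.reverse, PySem.Chars.isspace x = false := by
          intro x hx; exact hcur x (List.mem_reverse.mp hx)
        rw [hrev] at hall ⊢
        have hcr : ∀ x ∈ cr, (fun x => !PySem.Chars.isspace x) x = true := by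
          intro x hx; simp [hall x (by simp [hx])]
        simp only [List.cons_append, pvMySplit, hall c0 (by simp)]
        rw [List.takeWhile_append, List.dropWhile_append,
            List.takeWhile_eq_self_iff.mpr hcr,
            List.dropWhile_eq_nil_iff.mpr (by intro x hx; exact hcr x hx)]
        simp [pvMySplit, hsp]
    · rename_i hsp
      rw [ih (c :: cur) ?_]
      · simp
      · intro x hx
        rcases List.mem_cons.mp hx with rfl | hx
        · simpa using hsp
        · exact hcur x hx

theorem pvSplit₀_eq_mySplit (cs : List Char) : PySem.Chars.split₀ cs = pvMySplit cs := by
  simpa using pvGo_eq_mySplit cs [] (by simp)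

theorem pvLower_space {b : Char} (h : PySem.Chars.isspace b = true) :
    PySem.Chars.lowerChar b = b := by
  simp only [PySem.Chars.isspace, PySem.Chars.lowerChar, PySem.Chars.isupper] at *
  split
  · rename_i hu
    exfalso
    simp only [Bool.and_eq_true, decide_eq_true_eq] at hu
    have h1 : 65 ≤ b.toNat := hu.1
    have h2 : b.toNat ≤ 90 := hu.2
    simp only [Bool.or_eq_true, Bool.and_eq_true, decide_eq_true_eq] at h
    omega
  · rfl

theorem pvDigraph_space {a b : Char} (h : PySem.Chars.isspace b = true) :
    pvDigraph a (PySem.Chars.lowerChar b) = none := by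
  rw [pvLower_space h]
  have hh : b ≠ 'h' := by rintro rfl; simp [PySem.Chars.isspace] at h
  have hz : b ≠ 'z' := by rintro rfl; simp [PySem.Chars.isspace] at h
  simp [pvDigraph, hh, hz]

theorem pvJoin_nil_cons (x : List Char) (xs : List (List Char)) :
    PySem.Chars.join [] (x :: xs) = x ++ PySem.Chars.join [] xs := by
  cases xs <;> simp [PySem.Chars.join, List.intercalate, List.intersperse]

theorem pvIntercalate_cons (x : List Char) (xs : List (List Char)) :
    List.intercalate [' '] (x :: xs) = x ++ xs.flatMap (fun y => ' ' :: y) := by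
  induction xs generalizing x <;> simp_all [List.intercalate, List.intersperse]

theorem pvBGo_space_head : ∀ (cs : List Char) (f : Bool),
    (∀ c2, cs.head? = some c2 → PySem.Chars.isspace c2 = true) →
    pvBGo cs f true = pvBGo cs f false := by
  intro cs f h
  cases cs with
  | nil => simp [pvBGo]
  | cons d r => rw [pvBGo_sp r f true (h d rfl), pvBGo_sp r f false (h d rfl)]

theorem pvBGo_word (n : Nat) : ∀ (w cs : List Char) (f inw : Bool),
    w.length ≤ n → w ≠ [] → (∀ x ∈ w, PySem.Chars.isspace x = false) →
    (∀ c2, cs.head? = some c2 → PySem.Chars.isspace c2 = true) →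
    pvBGo (w ++ cs) f inw =
      (if inw || f then [] else [' ']) ++ pvFW w ++ pvBGo cs false false := by
  induction n with
  | zero =>
    intro w cs f inw hl hne _ _
    exact absurd (List.eq_nil_of_length_eq_zero (Nat.le_zero.mp hl)) hne
  | succ n ih =>
    intro w cs f inw hl hne hw hcs
    match w with
    | [c] =>
      have hc := hw c (by simp)
      have hfw1 : pvFW [c] = pvStep1 c := by
        simp [pvFW, PySem.Chars.lower, pvALoop, pvStep1, PySem.Chars.join,
              List.intercalate, List.intersperse]
      cases cs with
      | nil =>
        rw [List.append_nil, pvBGo_one f inw hc, hfw1]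
        try simp [pvBGo]
      | cons c2 rest2 =>
        have h2 := hcs c2 rfl
        rw [show ([c] ++ c2 :: rest2) = c :: c2 :: rest2 by simp,
            pvBGo_nodig rest2 f inw hc (pvDigraph_space h2),
            pvBGo_space_head (c2 :: rest2) false (by intro x hx; simp at hx; rw [← hx]; exact h2),
            hfw1]
    | c1 :: c2 :: w' =>
      have h1 := hw c1 (by simp)
      have h2 := hw c2 (by simp)
      have hfw : pvFW (c1 :: c2 :: w') =
          (match pvDigraph (PySem.Chars.lowerChar c1) (PySem.Chars.lowerChar c2) with
           | some h => h ++ pvFW w'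
           | none => pvStep1 c1 ++ pvFW (c2 :: w')) := by
        simp only [pvFW, PySem.Chars.lower, List.map_cons]
        cases hd : pvDigraph (PySem.Chars.lowerChar c1) (PySem.Chars.lowerChar c2) with
        | some h => simp [pvALoop, hd, pvJoin_nil_cons]
        | none =>
          simp only [pvALoop, hd, pvStep1]
          cases hl2 : pvLatin (PySem.Chars.lowerChar c1) <;>
            simp [pvJoin_nil_cons]
      cases hd : pvDigraph (PySem.Chars.lowerChar c1) (PySem.Chars.lowerChar c2) with
      | some h =>
        rw [show ((c1 :: c2 :: w') ++ cs) = c1 :: c2 :: (w' ++ cs) by simp,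
            pvBGo_dig (w' ++ cs) f inw h1 hd, hfw]
        simp only [hd]
        cases hwe : w' with
        | nil =>
          rw [List.nil_append, pvBGo_space_head cs false hcs]
          simp [pvFW, PySem.Chars.lower, pvALoop, PySem.Chars.join, List.intercalate]
        | cons d w'' =>
          rw [show (d :: w'' ++ cs) = ((d :: w'') ++ cs) from rfl,
              ih (d :: w'') cs false true (by rw [hwe] at hl; simp at hl ⊢; omega) (by simp)
                (fun x hx => hw x (by rw [hwe]; simp at hx ⊢; tauto)) hcs]
          simp
      | none =>
        rw [show ((c1 :: c2 :: w') ++ cs) = c1 :: c2 :: (w' ++ cs) by simp,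
            pvBGo_nodig (w' ++ cs) f inw h1 hd, hfw,
            show (c2 :: (w' ++ cs)) = ((c2 :: w') ++ cs) by simp,
            ih (c2 :: w') cs false true (by simp at hl ⊢; omega) (by simp)
              (fun x hx => hw x (by simp at hx ⊢; tauto)) hcs]
        simp [hd]

theorem pvDropWhile_head {p : Char → Bool} : ∀ (l : List Char) (d : Char) (r : List Char),
    l.dropWhile p = d :: r → p d = false := by
  intro l
  induction l with
  | nil => intro d r h; simp at h
  | cons x xs ih =>
    intro d r h
    by_cases hx : p x
    · rw [List.dropWhile_cons_of_pos hx] at h; exact ih d r h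
    · rw [List.dropWhile_cons_of_neg hx] at h
      cases h; simpa using hx

theorem pvBGo_split (n : Nat) : ∀ (cs : List Char) (f : Bool), cs.length ≤ n →
    pvBGo cs f false =
      if f then PySem.Chars.join [' '] ((pvMySplit cs).map pvFW)
      else (pvMySplit cs).flatMap (fun w => ' ' :: pvFW w) := by
  induction n with
  | zero =>
    intro cs f hl
    have : cs = [] := List.eq_nil_of_length_eq_zero (Nat.le_zero.mp hl)
    subst this
    cases f <;> simp [pvBGo, pvMySplit, PySem.Chars.join, List.intercalate]
  | succ n ih =>
    intro cs f hl
    cases cs with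
    | nil => cases f <;> simp [pvBGo, pvMySplit, PySem.Chars.join, List.intercalate]
    | cons c rest =>
      by_cases hsp : PySem.Chars.isspace c = true
      · rw [pvBGo_sp rest f false hsp, ih rest f (by simp at hl; omega)]
        simp [pvMySplit, hsp]
      · replace hsp : PySem.Chars.isspace c = false := by simpa using hsp
        obtain ⟨P, hP⟩ : ∃ P, P = fun x => !PySem.Chars.isspace x := ⟨_, rfl⟩
        obtain ⟨tw, htw⟩ : ∃ tw, tw = rest.takeWhile P := ⟨_, rfl⟩
        obtain ⟨dw, hdw⟩ : ∃ dw, dw = rest.dropWhile P := ⟨_, rfl⟩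
        have hwne : (c :: tw) ≠ [] := by simp
        have hwns : ∀ x ∈ c :: tw, PySem.Chars.isspace x = false := by
          intro x hx
          rcases List.mem_cons.mp hx with rfl | hx
          · exact hsp
          · have := List.mem_takeWhile_imp (htw ▸ hx)
            rw [hP] at this
            simpa using this
        have hdwh : ∀ c2, dw.head? = some c2 → PySem.Chars.isspace c2 = true := by
          intro c2 h2
          cases hd : dw with
          | nil => rw [hd] at h2; simp at h2
          | cons d r =>
            rw [hd] at h2; simp at h2
            rw [← h2]
            have hpd := pvDropWhile_head rest d r (by rw [← hdw, hd])
            rw [hP] at hpd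
            simpa using hpd
        have hms : pvMySplit (c :: rest) = (c :: tw) :: pvMySplit dw := by
          simp [pvMySplit, hsp, htw, hdw, hP]
        have hr : rest = tw ++ dw := by rw [htw, hdw, List.takeWhile_append_dropWhile]
        rw [hms, hr, show c :: (tw ++ dw) = (c :: tw) ++ dw from rfl,
            pvBGo_word (c :: tw).length (c :: tw) dw f false le_rfl hwne hwns hdwh]
        have hdl : dw.length ≤ rest.length := hdw ▸ List.length_dropWhile_le P rest
        rw [ih dw false (by simp at hl; omega)]
        cases f
        · simp
        · simp [PySem.Chars.join, pvIntercalate_cons, List.flatMap_map]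

-- ===== VERDICT (by name: the statement is the Claim_ definition above) =====
theorem transliterate_to_hebrew_py_spec : Claim_equal_transliterate_to_hebrew_py := by
  intro text _
  unfold Spec_transliterate_to_hebrew_py transliterate_to_hebrew_py transliterate_to_hebrew_py_alt
  rw [pvBGo_split text.toList.length text.toList true le_rfl, if_pos rfl, ← pvSplit₀_eq_mySplit]
  simp only [PySem.Str.join, PySem.Str.split₀, List.map_map]
  apply congrArg
  have hsep : (" " : String).toList = [' '] := rfl
  rw [hsep]
  apply congrArg
  apply List.map_congr_left
  intro w _
  simp only [Function.comp_apply, String.toList_ofList]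
  rfl
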